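-- pv_equiv track=rewrite | github.com/tooooooooomy/competition-programming | at-coder-problems/saiko-no-iseki.py | solve
-- ===== SOURCE A (Python) =====
-- import itertools
--
-- def solve(n, a):
--     ans = 0
--
--     for p1, p2 in itertools.combinations(a, 2):
--         x = p2[0] - p1[0]
--         y = p2[1] - p1[1]
--
--         if (p1[0] - y, p1[1] + x) in a and (p2[0] - y, p2[1] + x) in a:
--             ans = max(ans, x ** 2 + y ** 2)
--
--     return ans
-- ===== SOURCE B (Python) =====
-- def solve(n, a):
--     # Treat each unordered pair as a DIAGONAL of a candidate square; O(1) set membership.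
--     pts = set(a)
--     ans = 0
--     rest = a
--     while rest:
--         (x1, y1), rest = rest[0], rest[1:]
--         for (x2, y2) in rest:
--             dx = x2 - x1
--             dy = y2 - y1
--             if (x1 + x2 + dy) % 2 == 0 and (y1 + y2 + dx) % 2 == 0:
--                 c1 = ((x1 + x2 - dy) // 2, (y1 + y2 + dx) // 2)
--                 c2 = ((x1 + x2 + dy) // 2, (y1 + y2 - dx) // 2)
--                 if c1 in pts and c2 in pts:
--                     ans = max(ans, (dx * dx + dy * dy) // 2)
--     return ans
-- ===== Notes on version B (the rewrite author's own statement) =====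
-- stated objective: faster
-- what changed: B builds a set of the points once and interprets each unordered pair as a DIAGONAL of a candidate square (parity checks plus integer half-corner arithmetic, side-squared = half the diagonal squared), instead of A's edge interpretation with an O(n) list membership scan per pair.
import Mathlib
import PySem

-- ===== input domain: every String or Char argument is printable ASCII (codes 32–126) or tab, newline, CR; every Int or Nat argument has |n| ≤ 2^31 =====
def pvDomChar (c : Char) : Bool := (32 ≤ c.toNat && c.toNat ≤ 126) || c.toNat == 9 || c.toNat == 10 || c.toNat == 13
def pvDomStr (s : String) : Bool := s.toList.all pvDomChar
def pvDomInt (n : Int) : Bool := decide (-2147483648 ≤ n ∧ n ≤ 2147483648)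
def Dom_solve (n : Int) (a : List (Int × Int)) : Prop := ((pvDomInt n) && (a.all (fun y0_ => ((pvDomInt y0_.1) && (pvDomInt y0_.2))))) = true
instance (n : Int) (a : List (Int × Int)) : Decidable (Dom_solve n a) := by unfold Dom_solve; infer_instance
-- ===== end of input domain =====

-- B re-implements the search by treating each unordered pair of points as a DIAGONAL of a
-- candidate square (parity checks + integer half-corners) with O(1) set membership, instead
-- of A's edge interpretation with O(n) list membership per pair; objective: faster (constant/asymptotic per-pair cost).

-- ===== PORT A =====
-- itertools.combinations(a, 2), in order
def pvComb2 {α : Type} : List α → List (α × α)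
  | [] => []
  | p :: rest => (rest.map (fun q => (p, q))) ++ pvComb2 rest

-- the body of A's for-loop
def pvStepA (a : List (Int × Int)) (ans : Int) (pq : (Int × Int) × (Int × Int)) : Int :=
  let x := pq.2.1 - pq.1.1
  let y := pq.2.2 - pq.1.2
  if a.contains (pq.1.1 - y, pq.1.2 + x) && a.contains (pq.2.1 - y, pq.2.2 + x) then
    max ans (x ^ 2 + y ^ 2)
  else ans

def solve (n : Int) (a : List (Int × Int)) : Int :=
  (pvComb2 a).foldl (pvStepA a) 0

-- ===== PORT B =====
-- the body of B's inner for-loop, on the pair (p1, p2) taken as a diagonal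
def pvStepB (pts : PySem.Set (Int × Int)) (ans : Int) (pq : (Int × Int) × (Int × Int)) : Int :=
  let dx := pq.2.1 - pq.1.1
  let dy := pq.2.2 - pq.1.2
  if PySem.Int.mod (pq.1.1 + pq.2.1 + dy) 2 == 0 && PySem.Int.mod (pq.1.2 + pq.2.2 + dx) 2 == 0 then
    let c1 := (PySem.Int.floordiv (pq.1.1 + pq.2.1 - dy) 2, PySem.Int.floordiv (pq.1.2 + pq.2.2 + dx) 2)
    let c2 := (PySem.Int.floordiv (pq.1.1 + pq.2.1 + dy) 2, PySem.Int.floordiv (pq.1.2 + pq.2.2 - dx) 2)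
    if PySem.Set.contains pts c1 && PySem.Set.contains pts c2 then
      max ans (PySem.Int.floordiv (dx * dx + dy * dy) 2)
    else ans
  else ans

-- B's inner 'for (x2, y2) in rest'
def pvInnerB (pts : PySem.Set (Int × Int)) (p1 : Int × Int) (rest : List (Int × Int)) (ans : Int) : Int :=
  rest.foldl (fun ans p2 => pvStepB pts ans (p1, p2)) ans

-- B's outer 'while rest' loop
def pvLoopB (pts : PySem.Set (Int × Int)) : List (Int × Int) → Int → Int
  | [], ans => ans
  | p :: rest, ans => pvLoopB pts rest (pvInnerB pts p rest ans)

def solve_alt (n : Int) (a : List (Int × Int)) : Int :=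
  pvLoopB (PySem.Set.ofList a) a 0

-- ===== PRECONDITION & SPEC =====
def Spec_solve (n : Int) (a : List (Int × Int)) (out : Int) : Prop := out = solve_alt n a
instance (n : Int) (a : List (Int × Int)) (out : Int) : Decidable (Spec_solve n a out) := by unfold Spec_solve; infer_instance

-- ===== CLAIM (what is proved, stated in full; the proofs are below) =====
def Claim_equal_solve : Prop := ∀ (n : Int) (a : List (Int × Int)), Dom_solve n a → Spec_solve n a (solve n a)

-- ===== LEMMAS AND PROOFS =====

-- condition and value of A's step
def pvCondA (a : List (Int × Int)) (pq : (Int × Int) × (Int × Int)) : Bool :=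
  a.contains (pq.1.1 - (pq.2.2 - pq.1.2), pq.1.2 + (pq.2.1 - pq.1.1)) &&
  a.contains (pq.2.1 - (pq.2.2 - pq.1.2), pq.2.2 + (pq.2.1 - pq.1.1))

def pvValA (pq : (Int × Int) × (Int × Int)) : Int :=
  (pq.2.1 - pq.1.1) ^ 2 + (pq.2.2 - pq.1.2) ^ 2

-- condition and value of B's step
def pvCondB (pts : PySem.Set (Int × Int)) (pq : (Int × Int) × (Int × Int)) : Bool :=
  (PySem.Int.mod (pq.1.1 + pq.2.1 + (pq.2.2 - pq.1.2)) 2 == 0) &&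
  (PySem.Int.mod (pq.1.2 + pq.2.2 + (pq.2.1 - pq.1.1)) 2 == 0) &&
  PySem.Set.contains pts (PySem.Int.floordiv (pq.1.1 + pq.2.1 - (pq.2.2 - pq.1.2)) 2,
                          PySem.Int.floordiv (pq.1.2 + pq.2.2 + (pq.2.1 - pq.1.1)) 2) &&
  PySem.Set.contains pts (PySem.Int.floordiv (pq.1.1 + pq.2.1 + (pq.2.2 - pq.1.2)) 2,
                          PySem.Int.floordiv (pq.1.2 + pq.2.2 - (pq.2.1 - pq.1.1)) 2)

def pvValB (pq : (Int × Int) × (Int × Int)) : Int :=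
  PySem.Int.floordiv ((pq.2.1 - pq.1.1) * (pq.2.1 - pq.1.1) + (pq.2.2 - pq.1.2) * (pq.2.2 - pq.1.2)) 2

-- the common "running max over passing pairs" fold
def pvMFold {α : Type} (C : α → Bool) (v : α → Int) (L : List α) (ans : Int) : Int :=
  L.foldl (fun ans x => if C x then max ans (v x) else ans) ans

lemma pvStepB_eq (pts : PySem.Set (Int × Int)) (ans : Int) (pq : (Int × Int) × (Int × Int)) :
    pvStepB pts ans pq = if pvCondB pts pq then max ans (pvValB pq) else ans := by
  unfold pvStepB pvCondB pvValB
  cases h1 : PySem.Int.mod (pq.1.1 + pq.2.1 + (pq.2.2 - pq.1.2)) 2 == 0 <;>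
  cases h2 : PySem.Int.mod (pq.1.2 + pq.2.2 + (pq.2.1 - pq.1.1)) 2 == 0 <;>
    simp_all

lemma solve_eq_mfold (n : Int) (a : List (Int × Int)) :
    solve n a = pvMFold (pvCondA a) pvValA (pvComb2 a) 0 := by
  rfl

lemma pvLoopB_eq_mfold (pts : PySem.Set (Int × Int)) :
    ∀ (l : List (Int × Int)) (ans : Int),
      pvLoopB pts l ans = pvMFold (pvCondB pts) pvValB (pvComb2 l) ans := by
  intro l
  induction l with
  | nil => intro ans; rfl
  | cons p rest ih =>
    intro ans
    unfold pvLoopB pvComb2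
    rw [ih]
    unfold pvMFold
    rw [List.foldl_append, List.foldl_map]
    congr 1
    unfold pvInnerB
    congr 1
    funext ans p2
    exact pvStepB_eq pts ans (p, p2)

lemma solve_alt_eq_mfold (n : Int) (a : List (Int × Int)) :
    solve_alt n a = pvMFold (pvCondB (PySem.Set.ofList a)) pvValB (pvComb2 a) 0 := by
  unfold solve_alt
  exact pvLoopB_eq_mfold _ a 0

-- basic facts about pvMFold
lemma le_pvMFold_init {α : Type} (C : α → Bool) (v : α → Int) (L : List α) (ans : Int) :
    ans ≤ pvMFold C v L ans := by
  induction L generalizing ans with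
  | nil => simp [pvMFold]
  | cons x L ih =>
    unfold pvMFold
    rw [List.foldl_cons]
    refine le_trans ?_ (ih _)
    split <;> simp

lemma le_pvMFold_of_mem {α : Type} (C : α → Bool) (v : α → Int) {L : List α} {x : α}
    (hx : x ∈ L) (hC : C x = true) (ans : Int) : v x ≤ pvMFold C v L ans := by
  induction L generalizing ans with
  | nil => cases hx
  | cons y L ih =>
    unfold pvMFold
    rw [List.foldl_cons]
    rcases List.mem_cons.mp hx with rfl | hx'
    · refine le_trans ?_ (le_pvMFold_init C v L _)
      simp [hC]
    · exact ih hx' _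

lemma pvMFold_le {α : Type} (C : α → Bool) (v : α → Int) (L : List α) (ans b : Int)
    (h0 : ans ≤ b) (h : ∀ x ∈ L, C x = true → v x ≤ b) : pvMFold C v L ans ≤ b := by
  induction L generalizing ans with
  | nil => simpa [pvMFold] using h0
  | cons x L ih =>
    unfold pvMFold
    rw [List.foldl_cons]
    apply ih
    · split
      · rename_i hCx
        exact max_le h0 (h x List.mem_cons_self hCx)
      · exact h0
    · exact fun y hy hCy => h y (List.mem_cons_of_mem _ hy) hCy

-- membership in pvComb2: exactly the position pairs i < j
lemma mem_comb2_of_indices {α : Type} {l : List α} {p q : α} {i j : Nat}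
    (hij : i < j) (hp : l[i]? = some p) (hq : l[j]? = some q) : (p, q) ∈ pvComb2 l := by
  induction l generalizing i j with
  | nil => simp at hp
  | cons h t ih =>
    unfold pvComb2
    rw [List.mem_append]
    cases i with
    | zero =>
      left
      obtain ⟨j', rfl⟩ : ∃ j', j = j' + 1 := ⟨j - 1, by omega⟩
      simp only [List.getElem?_cons_zero, Option.some.injEq] at hp
      simp only [List.getElem?_cons_succ] at hq
      subst hp
      exact List.mem_map.mpr ⟨q, List.mem_of_getElem? hq, rfl⟩
    | succ i' =>
      right
      obtain ⟨j', rfl⟩ : ∃ j', j = j' + 1 := ⟨j - 1, by omega⟩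
      simp only [List.getElem?_cons_succ] at hp hq
      exact ih (by omega) hp hq

lemma indices_of_mem_comb2 {α : Type} {l : List α} {p q : α}
    (h : (p, q) ∈ pvComb2 l) : ∃ i j : Nat, i < j ∧ l[i]? = some p ∧ l[j]? = some q := by
  induction l with
  | nil => cases h
  | cons hd t ih =>
    unfold pvComb2 at h
    rcases List.mem_append.mp h with h1 | h2
    · obtain ⟨q', hq', heq⟩ := List.mem_map.mp h1
      obtain ⟨rfl, rfl⟩ : hd = p ∧ q' = q := by
        constructor <;> [exact congrArg Prod.fst heq; exact congrArg Prod.snd heq]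
      obtain ⟨j, hj⟩ := List.mem_iff_getElem?.mp hq'
      exact ⟨0, j + 1, by omega, rfl, by simpa using hj⟩
    · obtain ⟨i, j, hij, hp, hq⟩ := ih h2
      exact ⟨i + 1, j + 1, by omega, by simpa using hp, by simpa using hq⟩

-- arithmetic helpers
lemma pv_fd2 (k : Int) : PySem.Int.floordiv (2 * k) 2 = k := by
  rw [PySem.Int.floordiv_eq_ediv_of_pos (by norm_num)]
  omega

lemma pv_mod2 (k : Int) : PySem.Int.mod (2 * k) 2 = 0 := by
  rw [PySem.Int.mod_eq_zero_iff_dvd]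
  exact ⟨k, rfl⟩

-- characterization of B's condition: the pair (x1,y1)-(x2,y2) is an accepted diagonal
-- iff the diagonal vector is (u-w, u+w) and the two derived corners are in pts
lemma pvCondB_intro (pts : PySem.Set (Int × Int)) (x1 y1 x2 y2 u w : Int)
    (hu : x2 - x1 = u - w) (hw : y2 - y1 = u + w)
    (h1 : PySem.Set.contains pts (x1 - w, y1 + u) = true)
    (h2 : PySem.Set.contains pts (x1 + u, y1 + w) = true) :
    pvCondB pts ((x1, y1), (x2, y2)) = true ∧ pvValB ((x1, y1), (x2, y2)) = u ^ 2 + w ^ 2 := by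
  obtain rfl : x2 = x1 + u - w := by omega
  obtain rfl : y2 = y1 + u + w := by omega
  constructor
  · unfold pvCondB
    have e1 : x1 + (x1 + u - w) + (y1 + u + w - y1) = 2 * (x1 + u) := by ring
    have e2 : y1 + (y1 + u + w) + (x1 + u - w - x1) = 2 * (y1 + u) := by ring
    have e3 : x1 + (x1 + u - w) - (y1 + u + w - y1) = 2 * (x1 - w) := by ring
    have e4 : y1 + (y1 + u + w) - (x1 + u - w - x1) = 2 * (y1 + w) := by ring
    rw [PySem.Set.contains_iff] at h1 h2
    simp only [e1, e2, e3, e4, pv_mod2, pv_fd2]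
    simp [h1, h2]
  · unfold pvValB
    have e5 : (x1 + u - w - x1) * (x1 + u - w - x1) + (y1 + u + w - y1) * (y1 + u + w - y1)
        = 2 * (u ^ 2 + w ^ 2) := by ring
    simp only [e5, pv_fd2]

lemma pvCondB_elim (pts : PySem.Set (Int × Int)) (x1 y1 x2 y2 : Int)
    (h : pvCondB pts ((x1, y1), (x2, y2)) = true) :
    ∃ u w : Int, x2 - x1 = u - w ∧ y2 - y1 = u + w ∧
      PySem.Set.contains pts (x1 - w, y1 + u) = true ∧
      PySem.Set.contains pts (x1 + u, y1 + w) = true ∧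
      pvValB ((x1, y1), (x2, y2)) = u ^ 2 + w ^ 2 := by
  unfold pvCondB at h
  simp only [Bool.and_eq_true, beq_iff_eq] at h
  obtain ⟨⟨⟨hm1, hm2⟩, hc1⟩, hc2⟩ := h
  rw [PySem.Int.mod_eq_zero_iff_dvd] at hm1 hm2
  obtain ⟨s, hs⟩ := hm1
  obtain ⟨t, ht⟩ := hm2
  -- dx + dy and dy - dx are even
  refine ⟨s - x1, y2 - y1 - (s - x1), by omega, by omega, ?_, ?_, ?_⟩
  · have e3 : x1 + x2 - (y2 - y1) = 2 * (x1 - (y2 - y1 - (s - x1))) := by omega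
    have e2 : y1 + y2 + (x2 - x1) = 2 * (y1 + (s - x1)) := by omega
    rw [e3, e2, pv_fd2, pv_fd2] at hc1
    exact hc1
  · have e1 : x1 + x2 + (y2 - y1) = 2 * (x1 + (s - x1)) := by omega
    have e4 : y1 + y2 - (x2 - x1) = 2 * (y1 + (y2 - y1 - (s - x1))) := by omega
    rw [e1, e4, pv_fd2, pv_fd2] at hc2
    exact hc2
  · unfold pvValB
    have e5 : (x2 - x1) * (x2 - x1) + (y2 - y1) * (y2 - y1)
        = 2 * ((s - x1) ^ 2 + (y2 - y1 - (s - x1)) ^ 2) := by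
      have h1 : x2 - x1 = (s - x1) - (y2 - y1 - (s - x1)) := by omega
      rw [h1]; ring
    simp only [e5, pv_fd2]

-- list membership from comb2 index facts
lemma pv_mem_of_get? {α : Type} {l : List α} {i : Nat} {p : α} (h : l[i]? = some p) : p ∈ l :=
  List.mem_of_getElem? h

-- A's max is at most B's max
lemma pv_A_le_B (a : List (Int × Int)) :
    pvMFold (pvCondA a) pvValA (pvComb2 a) 0 ≤
    pvMFold (pvCondB (PySem.Set.ofList a)) pvValB (pvComb2 a) 0 := by
  apply pvMFold_le
  · exact le_pvMFold_init _ _ _ 0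
  · rintro ⟨⟨x1, y1⟩, ⟨x2, y2⟩⟩ hmem hC
    -- A accepts the edge (x1,y1)→(x2,y2); x := x2-x1, y := y2-y1
    unfold pvCondA at hC
    simp only [Bool.and_eq_true, List.contains_iff_mem] at hC
    obtain ⟨hq1, hq2⟩ := hC
    by_cases hz : x2 - x1 = 0 ∧ y2 - y1 = 0
    · -- degenerate: value 0
      have : pvValA ((x1, y1), (x2, y2)) = 0 := by
        unfold pvValA; simp only []; rw [hz.1, hz.2]; ring
      rw [this]
      exact le_pvMFold_init _ _ _ 0
    · -- the diagonal pair is (x1,y1) and q2 := (x2 - y, y2 + x); they are distinct points of a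
      obtain ⟨i, j, hij, hpi, hpj⟩ := indices_of_mem_comb2 hmem
      have hp1a : (x1, y1) ∈ a := pv_mem_of_get? hpi
      have hq2a : (x2 - (y2 - y1), y2 + (x2 - x1)) ∈ a := hq2
      have hne : (x1, y1) ≠ (x2 - (y2 - y1), y2 + (x2 - x1)) := by
        intro he
        have h1 : x1 = x2 - (y2 - y1) := congrArg Prod.fst he
        have h2 : y1 = y2 + (x2 - x1) := congrArg Prod.snd he
        exact hz ⟨by omega, by omega⟩
      obtain ⟨i1, hgi1⟩ := List.mem_iff_getElem?.mp hp1a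
      obtain ⟨i2, hgi2⟩ := List.mem_iff_getElem?.mp hq2a
      have hne12 : i1 ≠ i2 := by
        intro he; subst he; rw [hgi1] at hgi2; exact hne (Option.some.injEq _ _ ▸ hgi2.symm ▸ rfl)
      have hvalA : pvValA ((x1, y1), (x2, y2)) = (x2 - x1) ^ 2 + (y2 - y1) ^ 2 := rfl
      have hcont1 : PySem.Set.contains (PySem.Set.ofList a) (x1 - (y2 - y1), y1 + (x2 - x1)) = true := by
        rw [PySem.Set.contains_iff, PySem.Set.mem_ofList]; exact hq1
      have hcontp2 : PySem.Set.contains (PySem.Set.ofList a) (x2, y2) = true := by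
        rw [PySem.Set.contains_iff, PySem.Set.mem_ofList]
        exact pv_mem_of_get? hpj
      rcases Nat.lt_or_ge i1 i2 with hlt | hge
      · -- pair ((x1,y1), q2) with u := x2-x1, w := y2-y1
        have hcb := pvCondB_intro (PySem.Set.ofList a) x1 y1 (x2 - (y2 - y1)) (y2 + (x2 - x1))
          (x2 - x1) (y2 - y1) (by ring) (by ring)
          (by simpa using hcont1) (by
            have : (x1 + (x2 - x1), y1 + (y2 - y1)) = (x2, y2) := by
              simp only [Prod.mk.injEq]; omega
            rw [this]; exact hcontp2)
        have hm : ((x1, y1), (x2 - (y2 - y1), y2 + (x2 - x1))) ∈ pvComb2 a :=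
          mem_comb2_of_indices hlt hgi1 hgi2
        rw [hvalA, ← hcb.2]
        exact le_pvMFold_of_mem _ _ hm hcb.1 0
      · -- pair (q2, (x1,y1)) with u := -(x2-x1), w := -(y2-y1)
        have hlt2 : i2 < i1 := by omega
        have hcb := pvCondB_intro (PySem.Set.ofList a) (x2 - (y2 - y1)) (y2 + (x2 - x1)) x1 y1
          (-(x2 - x1)) (-(y2 - y1)) (by ring) (by ring)
          (by
            have : (x2 - (y2 - y1) - -(y2 - y1), y2 + (x2 - x1) + -(x2 - x1)) = (x2, y2) := by
              simp only [Prod.mk.injEq]; omega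
            rw [this]; exact hcontp2)
          (by
            have : (x2 - (y2 - y1) + -(x2 - x1), y2 + (x2 - x1) + -(y2 - y1)) =
                (x1 - (y2 - y1), y1 + (x2 - x1)) := by
              simp only [Prod.mk.injEq]; omega
            rw [this]; exact hcont1)
        have hm : ((x2 - (y2 - y1), y2 + (x2 - x1)), (x1, y1)) ∈ pvComb2 a :=
          mem_comb2_of_indices hlt2 hgi2 hgi1
        have hval2 : pvValB ((x2 - (y2 - y1), y2 + (x2 - x1)), (x1, y1)) = (x2 - x1) ^ 2 + (y2 - y1) ^ 2 := by
          rw [hcb.2]; ring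
        rw [hvalA, ← hval2]
        exact le_pvMFold_of_mem _ _ hm hcb.1 0

-- B's max is at most A's max
lemma pv_B_le_A (a : List (Int × Int)) :
    pvMFold (pvCondB (PySem.Set.ofList a)) pvValB (pvComb2 a) 0 ≤
    pvMFold (pvCondA a) pvValA (pvComb2 a) 0 := by
  apply pvMFold_le
  · exact le_pvMFold_init _ _ _ 0
  · rintro ⟨⟨x1, y1⟩, ⟨x2, y2⟩⟩ hmem hC
    obtain ⟨u, w, hu, hw, hc1, hc2, hval⟩ := pvCondB_elim _ x1 y1 x2 y2 hC
    rw [PySem.Set.contains_iff, PySem.Set.mem_ofList] at hc1 hc2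
    obtain ⟨i, j, hij, hpi, hpj⟩ := indices_of_mem_comb2 hmem
    obtain ⟨l0, hgl0⟩ := List.mem_iff_getElem?.mp hc2
    rw [hval]
    rcases Nat.lt_or_ge i l0 with hlt | hge
    · -- edge ((x1,y1), c2) detects the square, value u^2 + w^2
      have hm : ((x1, y1), (x1 + u, y1 + w)) ∈ pvComb2 a :=
        mem_comb2_of_indices hlt hpi hgl0
      have hCA : pvCondA a ((x1, y1), (x1 + u, y1 + w)) = true := by
        unfold pvCondA
        simp only [Bool.and_eq_true, List.contains_iff_mem]
        constructor
        · have e : (x1 - (y1 + w - y1), y1 + (x1 + u - x1)) = (x1 - w, y1 + u) := by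
            simp only [Prod.mk.injEq]; omega
          rw [e]; exact hc1
        · have e : (x1 + u - (y1 + w - y1), y1 + w + (x1 + u - x1)) = (x2, y2) := by
            simp only [Prod.mk.injEq]; omega
          rw [e]; exact pv_mem_of_get? hpj
      have hv : pvValA ((x1, y1), (x1 + u, y1 + w)) = u ^ 2 + w ^ 2 := by
        unfold pvValA; simp only []; ring
      rw [← hv]
      exact le_pvMFold_of_mem _ _ hm hCA 0
    · -- l0 ≤ i < j: edge (c2, (x2,y2)) detects the square
      have hlt2 : l0 < j := by omega
      have hm : ((x1 + u, y1 + w), (x2, y2)) ∈ pvComb2 a :=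
        mem_comb2_of_indices hlt2 hgl0 hpj
      have hCA : pvCondA a ((x1 + u, y1 + w), (x2, y2)) = true := by
        unfold pvCondA
        simp only [Bool.and_eq_true, List.contains_iff_mem]
        constructor
        · have e : (x1 + u - (y2 - (y1 + w)), y1 + w + (x2 - (x1 + u))) = (x1, y1) := by
            simp only [Prod.mk.injEq]; omega
          rw [e]; exact pv_mem_of_get? hpi
        · have e : (x2 - (y2 - (y1 + w)), y2 + (x2 - (x1 + u))) = (x1 - w, y1 + u) := by
            simp only [Prod.mk.injEq]; omega
          rw [e]; exact hc1
      have hv : pvValA ((x1 + u, y1 + w), (x2, y2)) = u ^ 2 + w ^ 2 := by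
        unfold pvValA
        simp only []
        have e1 : x2 - (x1 + u) = -w := by omega
        have e2 : y2 - (y1 + w) = u := by omega
        rw [e1, e2]; ring
      rw [← hv]
      exact le_pvMFold_of_mem _ _ hm hCA 0

-- ===== VERDICT (by name: the statement is the Claim_ definition above) =====
theorem solve_spec : Claim_equal_solve := by
  intro n a _hdom
  unfold Spec_solve
  rw [solve_eq_mfold, solve_alt_eq_mfold]
  exact le_antisymm (pv_A_le_B a) (pv_B_le_A a)
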